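-- pv_equiv track=rewrite | github.com/Lemelson/mia-multibrand-storefront | scripts/maxmara_online_fashion_extractor.py | model_token_match
-- ===== SOURCE A (Python) =====
-- from typing import Any, Dict, Iterable, List, Optional, Set, Tuple
--
-- MODEL_PREFIXES = (
--     "wkd",
--     "wkd",
--     "mst",
--     "mxm",
--     "smm",
--     "smd",
--     "mmd",
--     "wmm",
-- )
--
-- def strip_brand_prefix(segments: List[str]) -> List[str]:
--     """
--     Remove leading brand prefix tokens from a product slug like:
--       max-mara-<model>-<color>-<id>
--       max-mara-weekend-<model>-...
--       s-max-mara-<model>-...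
--     Keep later occurrences: model 'mara' should still be matchable if it appears
--     again after the brand prefix.
--     """
--     segs = [s for s in segments if s and not s.isdigit()]
--     # Normalize common prefixes
--     if segs[:3] == ["max", "mara", "weekend"]:
--         return segs[3:]
--     if segs[:3] == ["s", "max", "mara"]:
--         return segs[3:]
--     if segs[:2] == ["max", "mara"]:
--         return segs[2:]
--     return segs
--
-- def model_token_match(name: str, segments: List[str]) -> bool:
--     token = name.lower().strip()
--     if not token:
--         return False
--
--     core = strip_brand_prefix([s.lower() for s in segments])
--
--     # exact token
--     if token in core:
--         return True
--
--     # prefixed forms: wkdmulino, mstetere, mxm...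
--     for s in core:
--         if s.endswith(token):
--             prefix = s[: len(s) - len(token)]
--             if prefix in MODEL_PREFIXES:
--                 return True
--
--     # safe fallback for tokens length >= 5
--     if len(token) >= 5:
--         for s in core:
--             if token in s:
--                 return True
--
--     return False
-- ===== SOURCE B (Python) =====
-- MODEL_PREFIXES = (
--     "wkd",
--     "wkd",
--     "mst",
--     "mxm",
--     "smm",
--     "smd",
--     "mmd",
--     "wmm",
-- )
--
-- def model_token_match(name, segments):
--     token = name.lower().strip()
--     if not token:
--         return False
--     segs = [t for t in (s.lower() for s in segments) if t and not t.isdigit()]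
--     head = segs[:3]
--     if head == ["max", "mara", "weekend"] or head == ["s", "max", "mara"]:
--         core = segs[3:]
--     elif head[:2] == ["max", "mara"]:
--         core = segs[2:]
--     else:
--         core = segs
--     cands = set([token] + [p + token for p in MODEL_PREFIXES])
--     long_token = len(token) >= 5
--     for s in core:
--         if s in cands or (long_token and token in s):
--             return True
--     return False
-- ===== Notes on version B (the rewrite author's own statement) =====
-- stated objective: simpler
-- what changed: Replaces A's three sequential scans (exact membership, an endswith+slice prefix-reconstruction loop, a substring loop) by one precomputed candidate set {token} ∪ {p+token} and a single pass over core; the brand-prefix stripping is inlined with merged branches.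
import Mathlib
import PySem

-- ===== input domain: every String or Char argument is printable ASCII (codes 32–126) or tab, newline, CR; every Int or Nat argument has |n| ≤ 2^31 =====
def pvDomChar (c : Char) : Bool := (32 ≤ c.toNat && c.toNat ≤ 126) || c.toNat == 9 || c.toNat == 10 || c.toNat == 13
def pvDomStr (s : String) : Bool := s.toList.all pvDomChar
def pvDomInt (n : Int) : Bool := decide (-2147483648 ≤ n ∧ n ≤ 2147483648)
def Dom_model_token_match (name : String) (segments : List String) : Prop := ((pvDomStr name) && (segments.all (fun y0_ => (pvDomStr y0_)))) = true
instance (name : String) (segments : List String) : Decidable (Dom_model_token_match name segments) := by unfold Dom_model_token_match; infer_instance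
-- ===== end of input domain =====

-- B replaces A's three sequential scans over `core` by one precomputed candidate set and a single pass (objective: simpler); return values agree everywhere.

-- ===== PORT A =====
def MODEL_PREFIXES : List String := ["wkd", "wkd", "mst", "mxm", "smm", "smd", "mmd", "wmm"]

def strip_brand_prefix (segments : List String) : List String :=
  let segs := segments.filter (fun s => !(s == "") && !(PySem.Str.strIsdigit s))
  -- segs[:3] / segs[3:] with literal non-negative bounds are List.take / List.drop
  if segs.take 3 = ["max", "mara", "weekend"] then segs.drop 3
  else if segs.take 3 = ["s", "max", "mara"] then segs.drop 3
  else if segs.take 2 = ["max", "mara"] then segs.drop 2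
  else segs

def model_token_match (name : String) (segments : List String) : Bool :=
  let token := PySem.Str.strip (PySem.Str.lower name)
  if token = "" then false
  else
    let core := strip_brand_prefix (segments.map (fun s => PySem.Str.lower s))
    -- `if token in core: return True`
    if core.contains token then true
    -- the prefixed-forms loop with early return = any
    else if core.any (fun s =>
        PySem.Str.endswith s token &&
        MODEL_PREFIXES.contains
          (PySem.Str.slice s none (some (PySem.Str.len s - PySem.Str.len token)))) then true
    -- `if len(token) >= 5: for s in core: if token in s: return True`
    else if decide (5 ≤ PySem.Str.len token) && core.any (fun s => PySem.Str.isIn token s) then true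
    else false

-- ===== PORT B =====
def model_token_match_alt (name : String) (segments : List String) : Bool :=
  let token := PySem.Str.strip (PySem.Str.lower name)
  if token = "" then false
  else
    let segs := (segments.map (fun s => PySem.Str.lower s)).filter
      (fun s => !(s == "") && !(PySem.Str.strIsdigit s))
    let head := segs.take 3
    let core :=
      if head = ["max", "mara", "weekend"] ∨ head = ["s", "max", "mara"] then segs.drop 3
      else if head.take 2 = ["max", "mara"] then segs.drop 2
      else segs
    let cands : PySem.Set String :=
      PySem.Set.ofList (token :: MODEL_PREFIXES.map (fun p => p ++ token))
    let longTok := decide (5 ≤ PySem.Str.len token)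
    -- single pass with early return = any
    core.any (fun s => PySem.Set.contains cands s || (longTok && PySem.Str.isIn token s))

-- ===== PRECONDITION & SPEC =====
def Spec_model_token_match (name : String) (segments : List String) (out : Bool) : Prop := out = model_token_match_alt name segments
instance (name : String) (segments : List String) (out : Bool) : Decidable (Spec_model_token_match name segments out) := by unfold Spec_model_token_match; infer_instance

-- ===== CLAIM (what is proved, stated in full; the proofs are below) =====
def Claim_equal_model_token_match : Prop := ∀ (name : String) (segments : List String), Dom_model_token_match name segments → Spec_model_token_match name segments (model_token_match name segments)

-- ===== LEMMAS AND PROOFS =====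

lemma pvBoolExt {a b : Bool} (h : a = true ↔ b = true) : a = b := by
  cases a <;> cases b <;> simp_all

lemma pvChain (a b c : Bool) :
    (if a then true else if b then true else if c then true else false) = (a || b || c) := by
  cases a <;> cases b <;> cases c <;> simp

lemma pvAnyOr {α : Type} (l : List α) (p q : α → Bool) :
    l.any (fun x => p x || q x) = (l.any p || l.any q) := by
  induction l with
  | nil => rfl
  | cons x xs ih => simp [List.any_cons, ih]; cases p x <;> cases q x <;> simp

lemma pvAnyConstAnd {α : Type} (l : List α) (c : Bool) (p : α → Bool) :
    l.any (fun x => c && p x) = (c && l.any p) := by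
  cases c <;> simp

-- endswith + stripped-prefix equality is exactly "s is p followed by token"
lemma pref_iff (s token p : String) :
    (PySem.Str.endswith s token = true ∧
      PySem.Str.slice s none (some (PySem.Str.len s - PySem.Str.len token)) = p)
    ↔ s = p ++ token := by
  rw [PySem.Str.endswith_eq, PySem.Chars.endswith_iff]
  constructor
  · rintro ⟨⟨t, ht⟩, hsl⟩
    apply String.toList_injective
    rw [String.toList_append, ← hsl, PySem.Str.toList_slice, PySem.Chars.slice_eq_listSlice,
      PySem.Str.len_eq, PySem.Str.len_eq]
    have hlen : token.toList.length ≤ s.toList.length := by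
      rw [← ht]; simp
    rw [PySem.List.slice_to _ (by omega)]
    have hl : ((s.toList.length : Int) - token.toList.length).toNat = t.length := by
      rw [← ht]; simp
    rw [hl, ← ht, List.take_left]
  · rintro rfl
    refine ⟨by rw [String.toList_append]; exact List.suffix_append _ _, ?_⟩
    apply String.toList_injective
    rw [PySem.Str.toList_slice, PySem.Chars.slice_eq_listSlice, PySem.Str.len_eq, PySem.Str.len_eq,
      String.toList_append]
    have hb : (0:Int) ≤ ((p.toList ++ token.toList).length : Int) - token.toList.length := by
      simp
    rw [PySem.List.slice_to _ hb]
    have hl : (((p.toList ++ token.toList).length : Int) - token.toList.length).toNat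
        = p.toList.length := by simp
    rw [hl, List.take_left]

-- membership in B's candidate set is A's "exact match or recognised prefix" test
lemma cand_bool_eq (token s : String) :
    PySem.Set.contains (PySem.Set.ofList (token :: MODEL_PREFIXES.map (fun p => p ++ token))) s
    = ((s == token) || (PySem.Str.endswith s token &&
        MODEL_PREFIXES.contains
          (PySem.Str.slice s none (some (PySem.Str.len s - PySem.Str.len token))))) := by
  apply pvBoolExt
  simp only [PySem.Set.contains, List.contains_iff_mem, PySem.Set.mem_ofList, MODEL_PREFIXES,
    List.map_cons, List.map_nil, List.mem_cons, List.not_mem_nil, or_false,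
    Bool.or_eq_true, Bool.and_eq_true, beq_iff_eq, and_or_left, pref_iff]

-- B's merged brand-prefix branches compute A's strip_brand_prefix
lemma core_eq (l : List String) :
    (if l.take 3 = ["max", "mara", "weekend"] ∨ l.take 3 = ["s", "max", "mara"] then l.drop 3
     else if (l.take 3).take 2 = ["max", "mara"] then l.drop 2
     else l)
    = (if l.take 3 = ["max", "mara", "weekend"] then l.drop 3
       else if l.take 3 = ["s", "max", "mara"] then l.drop 3
       else if l.take 2 = ["max", "mara"] then l.drop 2
       else l) := by
  have h23 : (l.take 3).take 2 = l.take 2 := by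
    rw [List.take_take]; norm_num
  split_ifs <;> simp_all

-- ===== VERDICT (by name: the statement is the Claim_ definition above) =====
theorem model_token_match_spec : Claim_equal_model_token_match := by
  intro name segments _
  unfold Spec_model_token_match model_token_match model_token_match_alt strip_brand_prefix
  by_cases htok : PySem.Str.strip (PySem.Str.lower name) = ""
  · simp [htok]
  · simp only [htok, if_false]
    rw [core_eq]
    generalize (if ((segments.map (fun s => PySem.Str.lower s)).filter
        (fun s => !(s == "") && !(PySem.Str.strIsdigit s))).take 3 = ["max", "mara", "weekend"] then
        ((segments.map (fun s => PySem.Str.lower s)).filter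
          (fun s => !(s == "") && !(PySem.Str.strIsdigit s))).drop 3
      else _) = core
    rw [pvChain]
    simp only [cand_bool_eq, Bool.or_assoc]
    rw [pvAnyOr, pvAnyOr, pvAnyConstAnd, List.any_beq']
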